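-- pv_equiv track=rewrite | github.com/SCSCML/gym-gobang | gym_gobang/tests/test_draw.py | policy2
-- ===== SOURCE A (Python) =====
-- def policy2(board):
--     for i in range(len(board)):
--         if i//2%2==1:
--             for j in range(0,len(board),2):
--                 yield i*len(board)+j
--         else:
--             for j in range(1,len(board),2):
--                 yield i*len(board)+j
-- ===== SOURCE B (Python) =====
-- def policy2(board):
--     # single flat scan over all cell indices with a parity filter
--     n = len(board)
--     for k in range(n * n):
--         i, j = divmod(k, n)
--         if ((i // 2) % 2 == 1) == (j % 2 == 0):
--             yield k
-- ===== Notes on version B (the rewrite author's own statement) =====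
-- stated objective: alternative
-- what changed: Replaces the nested loops with strided inner ranges by one flat scan over all n*n cell indices, recovering (i, j) with divmod and keeping k exactly when the row/column parity condition ((i//2)%2==1) == (j%2==0) holds.
import Mathlib
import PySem

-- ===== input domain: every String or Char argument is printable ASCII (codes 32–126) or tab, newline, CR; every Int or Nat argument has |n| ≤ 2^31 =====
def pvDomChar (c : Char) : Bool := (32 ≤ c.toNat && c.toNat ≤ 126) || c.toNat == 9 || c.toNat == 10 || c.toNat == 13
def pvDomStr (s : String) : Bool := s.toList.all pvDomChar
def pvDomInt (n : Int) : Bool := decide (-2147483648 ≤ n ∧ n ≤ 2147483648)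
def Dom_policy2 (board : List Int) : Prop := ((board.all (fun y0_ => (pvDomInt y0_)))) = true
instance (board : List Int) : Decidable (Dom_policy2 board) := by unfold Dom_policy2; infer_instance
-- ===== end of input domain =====

-- B replaces A's nested strided loops by one flat scan over all n*n indices with a parity filter (alternative decomposition, same cost).

-- ===== PORT A =====
-- literal port of A: for i in range(n): if i//2%2==1: for j in range(0,n,2): yield i*n+j else: for j in range(1,n,2): yield i*n+j
def policy2 (board : List Int) : List Int :=
  (PySem.List.pyRange 0 (board.length : Int) 1).foldl (fun acc i =>
    if PySem.Int.mod (PySem.Int.floordiv i 2) 2 == 1 then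
      (PySem.List.pyRange 0 (board.length : Int) 2).foldl
        (fun acc2 j => acc2 ++ [i * (board.length : Int) + j]) acc
    else
      (PySem.List.pyRange 1 (board.length : Int) 2).foldl
        (fun acc2 j => acc2 ++ [i * (board.length : Int) + j]) acc) []

-- ===== PORT B =====
-- literal port of Source B: for k in range(n*n): i, j = divmod(k, n); yield k if ((i//2)%2==1)==(j%2==0)
-- divmod(k, n) is ported as (floordiv, mod); exact here since n > 0 whenever the loop body runs
def policy2_alt (board : List Int) : List Int :=
  (PySem.List.pyRange 0 ((board.length : Int) * (board.length : Int)) 1).foldl (fun acc k =>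
    let i := PySem.Int.floordiv k (board.length : Int)
    let j := PySem.Int.mod k (board.length : Int)
    if (PySem.Int.mod (PySem.Int.floordiv i 2) 2 == 1) == (PySem.Int.mod j 2 == 0) then
      acc ++ [k]
    else acc) []

-- ===== PRECONDITION & SPEC =====
def Spec_policy2 (board : List Int) (out : List Int) : Prop := out = policy2_alt board
instance (board : List Int) (out : List Int) : Decidable (Spec_policy2 board out) := by unfold Spec_policy2; infer_instance

-- ===== CLAIM (what is proved, stated in full; the proofs are below) =====
def Claim_equal_policy2 : Prop := ∀ (board : List Int), Dom_policy2 board → Spec_policy2 board (policy2 board)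

-- ===== LEMMAS AND PROOFS =====

-- the row condition i//2%2==1, B's flat predicate, one row of A
def pvC (i : Int) : Bool := PySem.Int.mod (PySem.Int.floordiv i 2) 2 == 1

def pvP (n k : Int) : Bool :=
  pvC (PySem.Int.floordiv k n) == (PySem.Int.mod (PySem.Int.mod k n) 2 == 0)

def pvRow (n : Int) (i : Int) : List Int :=
  (if pvC i then PySem.List.pyRange 0 n 2 else PySem.List.pyRange 1 n 2).map (fun j => i * n + j)

theorem pv_foldl_append_singleton {α β : Type} (f : α → β) (l : List α) (acc : List β) :
    l.foldl (fun a x => a ++ [f x]) acc = acc ++ l.map f := by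
  induction l generalizing acc with
  | nil => simp
  | cons x xs ih => simp [ih]

theorem pv_foldl_ite_append {α β : Type} (p : α → Bool) (f g : α → List β) (l : List α) (acc : List β) :
    l.foldl (fun a x => if p x then a ++ f x else a ++ g x) acc
      = acc ++ l.flatMap (fun x => if p x then f x else g x) := by
  induction l generalizing acc with
  | nil => simp
  | cons x xs ih => by_cases h : p x <;> simp [h, ih]

theorem pv_foldl_filter {α : Type} (p : α → Bool) (l : List α) (acc : List α) :
    l.foldl (fun a x => if p x then a ++ [x] else a) acc = acc ++ l.filter p := by
  induction l generalizing acc with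
  | nil => simp
  | cons x xs ih => by_cases h : p x <;> simp [h, ih]

theorem pv_evens_nat (N : Nat) :
    (List.range N).filter (fun k => k % 2 == 0) = (List.range ((N + 1) / 2)).map (fun k => 2 * k) := by
  induction N with
  | zero => simp
  | succ N ih =>
    rw [List.range_succ, List.filter_append, ih]
    by_cases h : N % 2 = 0
    · have h2 : (N + 1 + 1) / 2 = (N + 1) / 2 + 1 := by omega
      have h3 : 2 * ((N + 1) / 2) = N := by omega
      simp [h, h2, List.range_succ, h3]
    · have h2 : (N + 1 + 1) / 2 = (N + 1) / 2 := by omega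
      simp [h, h2]

theorem pv_odds_nat (N : Nat) :
    (List.range N).filter (fun k => k % 2 == 1) = (List.range (N / 2)).map (fun k => 2 * k + 1) := by
  induction N with
  | zero => simp
  | succ N ih =>
    rw [List.range_succ, List.filter_append, ih]
    by_cases h : N % 2 = 1
    · have h2 : (N + 1) / 2 = N / 2 + 1 := by omega
      have h3 : 2 * (N / 2) + 1 = N := by omega
      simp [h, h2, List.range_succ, h3]
    · have h2 : (N + 1) / 2 = N / 2 := by omega
      simp [h, h2]

theorem pv_pyRange_evens (N : Nat) :
    PySem.List.pyRange 0 (N : Int) 2 = (List.range ((N + 1) / 2)).map (fun k : Nat => (2 * k : Int)) := by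
  rw [PySem.List.pyRange_of_pos 0 (N : Int) (by norm_num)]
  have h : (if (0 : Int) < (N : Int) then (((N : Int) - 0 + 2 - 1) / 2).toNat else 0) = (N + 1) / 2 := by
    split <;> omega
  rw [h]
  refine List.map_congr_left ?_
  intro k _
  ring

theorem pv_pyRange_odds (N : Nat) :
    PySem.List.pyRange 1 (N : Int) 2 = (List.range (N / 2)).map (fun k : Nat => (2 * k + 1 : Int)) := by
  rw [PySem.List.pyRange_of_pos 1 (N : Int) (by norm_num)]
  have h : (if (1 : Int) < (N : Int) then (((N : Int) - 1 + 2 - 1) / 2).toNat else 0) = N / 2 := by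
    split <;> omega
  rw [h]
  refine List.map_congr_left ?_
  intro k _
  ring

theorem pv_mod_two_cast (k : Nat) : (PySem.Int.mod (k : Int) 2 == 0) = (k % 2 == 0) := by
  simp only [PySem.Int.mod, Int.fmod_eq_emod]
  by_cases h : k % 2 = 0
  · have h1 : ((k : Int)) % 2 = 0 := by omega
    simp [h, h1]
  · have h1 : ((k : Int)) % 2 = 1 := by omega
    simp [h, h1]

-- one slab of B's flat scan is exactly one row of A
theorem pv_block (N i : Nat) :
    (PySem.List.pyRange ((i : Int) * N) ((i : Int) * N + N) 1).filter (pvP (N : Int))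
      = pvRow (N : Int) (i : Int) := by
  rw [PySem.List.pyRange_one]
  have hlen : (((i : Int) * N + N) - (i : Int) * N).toNat = N := by omega
  rw [hlen, List.filter_map]
  have hcongr : ∀ k ∈ List.range N,
      (pvP (N : Int) ∘ fun k : Nat => (i : Int) * N + (k : Int)) k
        = (pvC (i : Int) == (k % 2 == 0)) := by
    intro k hk
    have hkN : k < N := List.mem_range.mp hk
    have hN : (0 : Int) < (N : Int) := by omega
    have hfd : ∀ a : Int, PySem.Int.floordiv a (N : Int) = a / (N : Int) := by
      intro a
      simp [PySem.Int.floordiv, Int.fdiv_eq_ediv, le_of_lt hN]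
    have hfm : ∀ a : Int, PySem.Int.mod a (N : Int) = a % (N : Int) := by
      intro a
      simp [PySem.Int.mod, Int.fmod_eq_emod, le_of_lt hN]
    have hdiv : PySem.Int.floordiv ((i : Int) * N + k) N = (i : Int) := by
      rw [hfd, add_comm, Int.add_mul_ediv_right _ _ (by omega : (N : Int) ≠ 0),
        Int.ediv_eq_zero_of_lt (by omega) (by omega)]
      ring
    have hmod : PySem.Int.mod ((i : Int) * N + k) N = (k : Int) := by
      rw [hfm, add_comm, Int.add_mul_emod_self_right,
        Int.emod_eq_of_lt (by omega) (by omega)]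
    simp only [Function.comp, pvP, hdiv, hmod, pv_mod_two_cast]
  rw [List.filter_congr hcongr]
  by_cases hc : pvC (i : Int)
  · have he : (fun k : Nat => (pvC (i : Int) == (k % 2 == 0))) = (fun k : Nat => k % 2 == 0) := by
      funext k; simp [hc]
    rw [he, pv_evens_nat, pvRow, if_pos hc, pv_pyRange_evens]
    simp only [List.map_map]
    refine List.map_congr_left ?_
    intro k _
    simp only [Function.comp]
    push_cast
    ring
  · have he : (fun k : Nat => (pvC (i : Int) == (k % 2 == 0))) = (fun k : Nat => k % 2 == 1) := by
      funext k
      have hc' : pvC (i : Int) = false := by simpa using hc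
      rcases Nat.mod_two_eq_zero_or_one k with h | h <;> simp [hc', h]
    rw [he, pv_odds_nat, pvRow, if_neg hc, pv_pyRange_odds]
    simp only [List.map_map]
    refine List.map_congr_left ?_
    intro k _
    simp only [Function.comp]
    push_cast
    ring

theorem pv_main (N m : Nat) :
    ((List.range m).map (fun k : Nat => (k : Int))).flatMap (pvRow (N : Int))
      = (PySem.List.pyRange 0 ((m : Int) * N) 1).filter (pvP (N : Int)) := by
  induction m with
  | zero => simp [PySem.List.pyRange_one_eq_nil]
  | succ m ih =>
    have h1 : (0 : Int) ≤ (m : Int) * N := by positivity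
    have h2 : ((m : Int) * N) ≤ (m : Int) * N + N := by omega
    have hb : (((m : Nat) + 1 : Nat) : Int) * N = (m : Int) * N + N := by push_cast; ring
    rw [hb, PySem.List.pyRange_one_append 0 ((m : Int) * N) ((m : Int) * N + N) h1 h2,
      List.filter_append, ← ih, List.range_succ, List.map_append, List.flatMap_append,
      pv_block N m]
    simp

theorem pv_alt_eq (board : List Int) :
    policy2_alt board
      = (PySem.List.pyRange 0 ((board.length : Int) * (board.length : Int)) 1).filter
          (pvP (board.length : Int)) := by
  show (PySem.List.pyRange 0 ((board.length : Int) * (board.length : Int)) 1).foldl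
      (fun acc k => if pvP (board.length : Int) k then acc ++ [k] else acc) [] = _
  rw [pv_foldl_filter]
  simp

theorem pv_a_eq (board : List Int) :
    policy2 board
      = ((List.range board.length).map (fun k : Nat => (k : Int))).flatMap
          (pvRow (board.length : Int)) := by
  show (PySem.List.pyRange 0 (board.length : Int) 1).foldl (fun acc i =>
      if pvC i then
        (PySem.List.pyRange 0 (board.length : Int) 2).foldl
          (fun acc2 j => acc2 ++ [i * (board.length : Int) + j]) acc
      else
        (PySem.List.pyRange 1 (board.length : Int) 2).foldl
          (fun acc2 j => acc2 ++ [i * (board.length : Int) + j]) acc) [] = _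
  have hinner0 : ∀ (i : Int) (acc : List Int),
      (PySem.List.pyRange 0 (board.length : Int) 2).foldl
        (fun acc2 j => acc2 ++ [i * (board.length : Int) + j]) acc
      = acc ++ (PySem.List.pyRange 0 (board.length : Int) 2).map
          (fun j => i * (board.length : Int) + j) := by
    intro i acc; rw [pv_foldl_append_singleton]
  have hinner1 : ∀ (i : Int) (acc : List Int),
      (PySem.List.pyRange 1 (board.length : Int) 2).foldl
        (fun acc2 j => acc2 ++ [i * (board.length : Int) + j]) acc
      = acc ++ (PySem.List.pyRange 1 (board.length : Int) 2).map
          (fun j => i * (board.length : Int) + j) := by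
    intro i acc; rw [pv_foldl_append_singleton]
  simp only [hinner0, hinner1]
  rw [pv_foldl_ite_append pvC]
  rw [PySem.List.pyRange_zero_natCast]
  simp only [List.nil_append]
  have hrow : (fun i : Int =>
      if pvC i then
        (PySem.List.pyRange 0 (board.length : Int) 2).map (fun j => i * (board.length : Int) + j)
      else
        (PySem.List.pyRange 1 (board.length : Int) 2).map (fun j => i * (board.length : Int) + j))
      = pvRow (board.length : Int) := by
    funext i
    by_cases h : pvC i <;> simp [pvRow, h]
  rw [hrow]

-- ===== VERDICT (by name: the statement is the Claim_ definition above) =====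
theorem policy2_spec : Claim_equal_policy2 := by
  intro board _
  unfold Spec_policy2
  rw [pv_a_eq, pv_alt_eq, pv_main board.length board.length]
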